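-- pv_equiv track=rewrite | github.com/Evgeniy1984No/Learning | Поколение Python Курс для профессионалов/15_Вложенные фукции/4.py | sort_priority
-- ===== SOURCE A (Python) =====
-- def sort_priority(values, group):
--     lst = []
--     for elem in sorted(group):
--         if elem in values:
--             values.remove(elem)
--             lst.append(elem)
--     values[:] = lst + sorted(values)
--     return values
-- ===== SOURCE B (Python) =====
-- def sort_priority(values, group):
--     # Mutates values in place (via values[:] = ...) just like the original.
--     cnt = {}
--     for v in values:
--         cnt[v] = cnt.get(v, 0) + 1
--     head = []
--     for g in sorted(group):
--         if cnt.get(g, 0) > 0: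
--             cnt[g] = cnt[g] - 1
--             head.append(g)
--     leftover = []
--     for v in values:
--         if cnt.get(v, 0) > 0:
--             leftover.append(v)
--             cnt[v] = cnt[v] - 1
--     values[:] = head + sorted(leftover)
--     return values
-- ===== Notes on version B (the rewrite author's own statement) =====
-- stated objective: faster
-- what changed: Replaces the per-group-element membership test and list.remove scans over values with a hash counter: one pass builds counts, the group loop decrements counts, a second pass over values collects the leftover multiset, which is then sorted.
import Mathlib
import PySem

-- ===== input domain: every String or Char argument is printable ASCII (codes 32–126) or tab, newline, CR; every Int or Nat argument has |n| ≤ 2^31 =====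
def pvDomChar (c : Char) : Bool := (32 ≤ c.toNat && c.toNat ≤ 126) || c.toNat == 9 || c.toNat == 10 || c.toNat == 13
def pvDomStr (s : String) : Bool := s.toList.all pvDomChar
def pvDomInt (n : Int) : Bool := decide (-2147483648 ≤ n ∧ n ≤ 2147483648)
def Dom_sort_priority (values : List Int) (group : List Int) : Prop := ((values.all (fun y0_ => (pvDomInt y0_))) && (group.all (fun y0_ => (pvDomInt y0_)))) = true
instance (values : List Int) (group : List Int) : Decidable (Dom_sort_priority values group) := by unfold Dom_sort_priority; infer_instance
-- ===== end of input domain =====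

-- Both Pythons mutate `values` in place (A via remove/`values[:]=`, B via `values[:]=`);
-- the equivalence proved here is about the RETURN value (identical to the final contents).
-- B replaces A's repeated membership/remove scans of `values` with a counter built once: faster.

-- ===== PORT A =====
-- loop body of A: 'if elem in values: values.remove(elem); lst.append(elem)'
def pvStepA (st : List Int × List Int) (elem : Int) : List Int × List Int :=
  if elem ∈ st.1 then ((PySem.List.remove? st.1 elem).getD st.1, st.2 ++ [elem]) else st
  -- remove? is guarded by the membership test, so it is always `some`; getD only makes it total

def sort_priority (values : List Int) (group : List Int) : List Int :=
  let st := (PySem.List.sorted group (fun x => x) false).foldl pvStepA (values, [])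
  st.2 ++ PySem.List.sorted st.1 (fun x => x) false

-- ===== PORT B =====
-- loop body shared by B's two counting loops: 'if cnt.get(x,0)>0: cnt[x]=cnt[x]-1; out.append(x)'
def pvStepB (st : PySem.Dict Int Int × List Int) (x : Int) : PySem.Dict Int Int × List Int :=
  if st.1.getD x 0 > 0 then (st.1.insert x (st.1.getD x 0 - 1), st.2 ++ [x]) else st

def sort_priority_alt (values : List Int) (group : List Int) : List Int :=
  let cnt : PySem.Dict Int Int := values.foldl (fun d v => d.insert v (d.getD v 0 + 1)) PySem.Dict.empty
  let st := (PySem.List.sorted group (fun x => x) false).foldl pvStepB (cnt, [])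
  let fin := values.foldl pvStepB (st.1, [])
  st.2 ++ PySem.List.sorted fin.2 (fun x => x) false

-- ===== PRECONDITION & SPEC =====
def Spec_sort_priority (values : List Int) (group : List Int) (out : List Int) : Prop := out = sort_priority_alt values group
instance (values : List Int) (group : List Int) (out : List Int) : Decidable (Spec_sort_priority values group out) := by unfold Spec_sort_priority; infer_instance

-- ===== CLAIM (what is proved, stated in full; the proofs are below) =====
def Claim_equal_sort_priority : Prop := ∀ (values : List Int) (group : List Int), Dom_sort_priority values group → Spec_sort_priority values group (sort_priority values group)

-- ===== LEMMAS AND PROOFS =====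

-- The group loop: B's counter mirrors A's remaining `values` multiset, the appended heads agree,
-- and counts are conserved between A's remaining list and its head list.
theorem pv_loop1 (gs : List Int) : ∀ (vals lst : List Int) (cnt : PySem.Dict Int Int),
    (∀ x, cnt.getD x 0 = (vals.count x : Int)) →
    (gs.foldl pvStepA (vals, lst)).2 = (gs.foldl pvStepB (cnt, lst)).2 ∧
    (∀ x, (gs.foldl pvStepB (cnt, lst)).1.getD x 0 = ((gs.foldl pvStepA (vals, lst)).1.count x : Int)) ∧
    (∀ x, ((gs.foldl pvStepA (vals, lst)).1.count x : Int) + ((gs.foldl pvStepA (vals, lst)).2.count x : Int)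
        = (vals.count x : Int) + (lst.count x : Int)) := by
  induction gs with
  | nil => intro vals lst cnt h; exact ⟨rfl, h, fun x => rfl⟩
  | cons g gs ih =>
    intro vals lst cnt h
    by_cases hg : g ∈ vals
    · have hrem : PySem.List.remove? vals g = some (vals.erase g) :=
        PySem.List.remove?_eq_some_erase _ _ hg
      have hA : pvStepA (vals, lst) g = (vals.erase g, lst ++ [g]) := by
        simp [pvStepA, hg, hrem]
      have hpos : cnt.getD g 0 > 0 := by
        rw [h g]; exact_mod_cast List.count_pos_iff.mpr hg
      have hB : pvStepB (cnt, lst) g = (cnt.insert g (cnt.getD g 0 - 1), lst ++ [g]) := by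
        simp [pvStepB, hpos]
      have hinv : ∀ x, (cnt.insert g (cnt.getD g 0 - 1)).getD x 0 = ((vals.erase g).count x : Int) := by
        intro x
        rw [PySem.Dict.getD_insert]
        by_cases hx : x = g
        · subst hx; rw [h x, List.count_erase_self]
          have : 0 < vals.count x := List.count_pos_iff.mpr hg
          simp; omega
        · rw [if_neg hx, h x, List.count_erase_of_ne hx]
      obtain ⟨e1, e2, e3⟩ := ih (vals.erase g) (lst ++ [g]) (cnt.insert g (cnt.getD g 0 - 1)) hinv
      refine ⟨?_, ?_, ?_⟩
      · simpa [List.foldl_cons, hA, hB] using e1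
      · simpa [List.foldl_cons, hA, hB] using e2
      · intro x
        have := e3 x
        simp only [List.foldl_cons, hA]
        rw [this]
        by_cases hx : x = g
        · subst hx
          have hc : 0 < vals.count x := List.count_pos_iff.mpr hg
          rw [List.count_erase_self]
          simp [List.count_append]
          push_cast
          omega
        · rw [List.count_erase_of_ne hx]
          simp [List.count_append, Ne.symm hx]
    · have hc0 : (vals.count g : Int) = 0 := by
        simp [List.count_eq_zero_of_not_mem hg]
      have hA : pvStepA (vals, lst) g = (vals, lst) := by simp [pvStepA, hg]
      have hB : pvStepB (cnt, lst) g = (cnt, lst) := by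
        have : cnt.getD g 0 = 0 := by rw [h g, hc0]
        simp [pvStepB, this]
      obtain ⟨e1, e2, e3⟩ := ih vals lst cnt h
      exact ⟨by simpa [List.foldl_cons, hA, hB] using e1,
             by simpa [List.foldl_cons, hA, hB] using e2,
             by simpa [List.foldl_cons, hA, hB] using e3⟩

-- The leftover loop: it collects, per value x, min(count of x in the scanned list, remaining counter) copies.
theorem pv_loop2 (vs : List Int) : ∀ (cnt : PySem.Dict Int Int) (acc : List Int),
    (∀ x, 0 ≤ cnt.getD x 0) →
    ∀ x, (((vs.foldl pvStepB (cnt, acc)).2.count x : Int))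
        = (acc.count x : Int) + min (vs.count x : Int) (cnt.getD x 0) := by
  induction vs with
  | nil =>
    intro cnt acc hnn x
    have := hnn x
    simp [List.count_nil]
    omega
  | cons v vs ih =>
    intro cnt acc hnn x
    by_cases hv : cnt.getD v 0 > 0
    · have hB : pvStepB (cnt, acc) v = (cnt.insert v (cnt.getD v 0 - 1), acc ++ [v]) := by
        simp [pvStepB, hv]
      have hnn' : ∀ y, 0 ≤ (cnt.insert v (cnt.getD v 0 - 1)).getD y 0 := by
        intro y; rw [PySem.Dict.getD_insert]
        by_cases hy : y = v
        · rw [if_pos hy]; omega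
        · rw [if_neg hy]; exact hnn y
      have := ih (cnt.insert v (cnt.getD v 0 - 1)) (acc ++ [v]) hnn' x
      simp only [List.foldl_cons, hB]
      rw [this, PySem.Dict.getD_insert]
      by_cases hx : x = v
      · subst hx
        simp [List.count_append, List.count_cons_self]
        omega
      · simp [List.count_append, List.count_singleton, List.count_cons, hx, Ne.symm hx]
    · have hz : cnt.getD v 0 = 0 := le_antisymm (by omega) (hnn v)
      have hB : pvStepB (cnt, acc) v = (cnt, acc) := by simp [pvStepB, hv]
      have := ih cnt acc hnn x
      simp only [List.foldl_cons, hB]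
      rw [this]
      by_cases hx : x = v
      · subst hx; rw [hz]
        simp [List.count_cons_self]
        omega
      · simp [Ne.symm hx]

-- ===== VERDICT (by name: the statement is the Claim_ definition above) =====
theorem sort_priority_spec : Claim_equal_sort_priority := by
  intro values group _
  unfold Spec_sort_priority
  simp only [sort_priority, sort_priority_alt]
  set gs := PySem.List.sorted group (fun x => x) false with hgs
  set cnt0 : PySem.Dict Int Int := values.foldl (fun d v => d.insert v (d.getD v 0 + 1)) PySem.Dict.empty with hcnt0
  have hinit : ∀ x, cnt0.getD x 0 = (values.count x : Int) := by
    intro x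
    rw [hcnt0, PySem.Dict.getD_foldl_insert_add_one, PySem.Dict.getD_empty]
    omega
  obtain ⟨e1, e2, e3⟩ := pv_loop1 gs values [] cnt0 hinit
  set a := gs.foldl pvStepA (values, []) with ha
  set b := gs.foldl pvStepB (cnt0, []) with hb
  have hnn : ∀ x, 0 ≤ b.1.getD x 0 := by
    intro x; rw [e2 x]; exact_mod_cast Nat.zero_le _
  have hleft := pv_loop2 values b.1 [] hnn
  have hcount : ∀ x, (values.foldl pvStepB (b.1, [])).2.count x = a.1.count x := by
    intro x
    have h2 := e2 x
    have h3 := e3 x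
    have hl := hleft x
    rw [h2] at hl
    simp [List.count_nil] at hl h3
    have : ((values.foldl pvStepB (b.1, [])).2.count x : Int) = (a.1.count x : Int) := by
      rw [hl]; omega
    exact_mod_cast this
  have hperm : (values.foldl pvStepB (b.1, [])).2.Perm a.1 :=
    List.perm_iff_count.mpr hcount
  have hsorted : PySem.List.sorted a.1 (fun x => x) false
      = PySem.List.sorted (values.foldl pvStepB (b.1, [])).2 (fun x => x) false :=
    PySem.List.sorted_eq_sorted_of_perm _ _ _ (fun _ _ h => h) hperm.symm
  rw [e1, hsorted]
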